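-- pv_equiv track=rewrite | github.com/ybao2000/algorithm_senior_aug2021 | ccc/ccc03s2.py | get_rhyme
-- ===== SOURCE A (Python) =====
-- def get_rhyme(word):
--   vowels = {'a', 'e', 'i', 'o', 'u'}
--   l = len(word)
--   for i in range(l-1, -1, -1):  #starting from the end, go backwards
--     if word[i] in vowels:
--       break
--   else:
--     i = 0 #whole word
--   return word[i:]
-- ===== SOURCE B (Python) =====
-- def get_rhyme(word):
--   vowels = {'a', 'e', 'i', 'o', 'u'}
--   last = 0
--   for i, ch in enumerate(word):
--     if ch in vowels:
--       last = i
--   return word[last:]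
-- ===== Notes on version B (the rewrite author's own statement) =====
-- stated objective: alternative
-- what changed: Replaced A's backward scan with early break (and for/else fallback) by a single forward pass over enumerate(word) that accumulates the index of the most recent vowel seen, defaulting to 0.
import Mathlib
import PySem

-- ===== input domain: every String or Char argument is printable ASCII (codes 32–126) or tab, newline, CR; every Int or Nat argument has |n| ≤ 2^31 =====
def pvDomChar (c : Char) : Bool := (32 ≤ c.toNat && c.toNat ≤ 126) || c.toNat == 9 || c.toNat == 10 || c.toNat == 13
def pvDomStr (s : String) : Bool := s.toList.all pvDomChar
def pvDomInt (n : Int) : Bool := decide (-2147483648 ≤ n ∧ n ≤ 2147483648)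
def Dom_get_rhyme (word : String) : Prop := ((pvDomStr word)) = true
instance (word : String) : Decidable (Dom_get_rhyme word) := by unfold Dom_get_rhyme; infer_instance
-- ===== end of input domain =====

-- B replaces A's backward break-loop (with for/else fallback) by a forward pass
-- accumulating the index of the most recent vowel; same cost, different decomposition.


-- ===== PORT A =====
-- vowels = {'a','e','i','o','u'} : membership test in the vowel set (shared by both ports)
def pvIsVowel (c : Char) : Bool := PySem.Set.contains (PySem.Set.ofList ['a', 'e', 'i', 'o', 'u']) c

-- the for-loop over range(l-1,-1,-1) with break, for/else giving i = 0;
-- word[i] is always in range here, so pyGetD is exact.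
def pvALoop (cs : List Char) : List Int → Int
  | [] => 0
  | i :: rest => if pvIsVowel (PySem.List.pyGetD cs i ' ') then i else pvALoop cs rest

def get_rhyme (word : String) : String :=
  let cs := word.toList
  let l : Int := cs.length
  let i := pvALoop cs (PySem.List.pyRange (l - 1) (-1) (-1))
  String.ofList (PySem.List.slice cs (some i) none)

-- ===== PORT B =====
def get_rhyme_alt (word : String) : String :=
  let cs := word.toList
  let last : Int := (PySem.List.enumerate cs 0).foldl
    (fun acc p => if pvIsVowel p.2 then p.1 else acc) 0
  String.ofList (PySem.List.slice cs (some last) none)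

-- ===== PRECONDITION & SPEC =====
def Spec_get_rhyme (word : String) (out : String) : Prop := out = get_rhyme_alt word
instance (word : String) (out : String) : Decidable (Spec_get_rhyme word out) := by unfold Spec_get_rhyme; infer_instance

-- ===== CLAIM (what is proved, stated in full; the proofs are below) =====
def Claim_equal_get_rhyme : Prop := ∀ (word : String), Dom_get_rhyme word → Spec_get_rhyme word (get_rhyme word)

-- ===== LEMMAS AND PROOFS =====

-- A's loop only reads indices appearing in its index list, so appending a character
-- beyond every such index does not change the result.
lemma pvALoop_append (cs : List Char) (c : Char) (l : List Int)
    (h : ∀ i ∈ l, 0 ≤ i ∧ i < (cs.length : Int)) :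
    pvALoop (cs ++ [c]) l = pvALoop cs l := by
  induction l with
  | nil => rfl
  | cons i rest ih =>
    have hi := h i (by simp)
    have hget : PySem.List.pyGetD (cs ++ [c]) i ' ' = PySem.List.pyGetD cs i ' ' := by
      rw [PySem.List.pyGetD_eq_getElem _ ' ' hi.1 (by simp; omega),
          PySem.List.pyGetD_eq_getElem _ ' ' hi.1 (by exact_mod_cast hi.2)]
      rw [List.getElem_append_left (by omega)]
    simp only [pvALoop, hget]
    rw [ih (fun j hj => h j (by simp [hj]))]

-- the central invariant: backward first-vowel scan = forward last-vowel accumulator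
lemma pvLoop_eq (cs : List Char) :
    pvALoop cs (PySem.List.pyRange ((cs.length : Int) - 1) (-1) (-1))
      = (PySem.List.enumerate cs 0).foldl
          (fun acc p => if pvIsVowel p.2 then p.1 else acc) 0 := by
  induction cs using List.reverseRecOn with
  | nil => simp [PySem.List.pyRange_neg_one_eq_nil, PySem.List.enumerate, pvALoop]
  | append_singleton cs c ih =>
    have hlen : ((cs ++ [c]).length : Int) - 1 = (cs.length : Int) := by simp
    rw [hlen, PySem.List.pyRange_neg_one_cons (by omega)]
    have hget : PySem.List.pyGetD (cs ++ [c]) (cs.length : Int) ' ' = c := by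
      rw [PySem.List.pyGetD_eq_getElem _ ' ' (Int.natCast_nonneg _) (by simp)]
      simp
    have hmem : ∀ i ∈ PySem.List.pyRange ((cs.length : Int) - 1) (-1) (-1),
        0 ≤ i ∧ i < (cs.length : Int) := by
      intro i hi
      rw [PySem.List.pyRange_neg_one] at hi
      simp only [List.mem_map, List.mem_range] at hi
      obtain ⟨k, hk, rfl⟩ := hi
      omega
    simp only [pvALoop, hget, pvALoop_append cs c _ hmem, ih]
    rw [PySem.List.enumerate_append]
    simp [PySem.List.enumerate]

-- ===== VERDICT (by name: the statement is the Claim_ definition above) =====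
theorem get_rhyme_spec : Claim_equal_get_rhyme := by
  intro word _
  unfold Spec_get_rhyme get_rhyme get_rhyme_alt
  simp only [pvLoop_eq]
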